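-- pv_equiv track=rewrite | github.com/donsidhd/1 | godot_cipher.py | _find_and_remove_duplicate_ctx
-- ===== SOURCE A (Python) =====
-- from typing import List, Tuple, Optional, Dict, Any
--
-- def _find_and_remove_duplicate_ctx(lines: List[str]) -> List[str]:
--     """查找并删除加密块中重复的 ctx 定义"""
--     in_close_function = False
--     ctx_count_in_close = 0
--     lines_to_remove = []
--
--     for i, line in enumerate(lines):
--         if 'void FileAccessEncrypted::_close()' in line:
--             in_close_function = True
--             continue
--
--         if in_close_function and line.startswith('}'):
--             break
--
--         if in_close_function and 'CryptoCore::AESContext ctx' in line and 'ctx.set_encode_key' not in lines[i+1] if i+1 < len(lines) else False: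
--             ctx_count_in_close += 1
--             if ctx_count_in_close > 1:
--                 lines_to_remove.append(i)
--
--     # 从后往前删除，避免索引变化
--     for i in reversed(lines_to_remove):
--         # 删除这一行
--         lines.pop(i)
--         # 如果下一行是 ctx.set_encode_key，也删除
--         if i < len(lines) and 'ctx.set_encode_key' in lines[i] and 'key.ptrw()' in lines[i]:
--             lines.pop(i)
--
--     return lines
-- ===== SOURCE B (Python) =====
-- from typing import List
--
-- def _find_and_remove_duplicate_ctx(lines: List[str]) -> List[str]:
--     """Single forward pass: skip 2nd+ duplicate ctx lines while copying; mutates lines in place."""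
--     n = len(lines)
--     result = []
--     in_close = False
--     count = 0
--     for i, line in enumerate(lines):
--         if 'void FileAccessEncrypted::_close()' in line:
--             in_close = True
--         elif in_close and line.startswith('}'):
--             result.extend(lines[i:])
--             break
--         elif (in_close and 'CryptoCore::AESContext ctx' in line
--               and i + 1 < n and 'ctx.set_encode_key' not in lines[i + 1]):
--             count += 1
--             if count > 1:
--                 continue
--         result.append(line)
--     lines[:] = result
--     return lines
-- ===== Notes on version B (the rewrite author's own statement) =====
-- stated objective: simpler
-- what changed: A scans to collect indices of duplicate ctx lines and then mutates the list by popping them back-to-front (with a companion-pop check that is provably dead); B is a single forward pass that skips duplicate ctx lines while copying, then assigns lines[:] = result.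
import Mathlib
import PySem

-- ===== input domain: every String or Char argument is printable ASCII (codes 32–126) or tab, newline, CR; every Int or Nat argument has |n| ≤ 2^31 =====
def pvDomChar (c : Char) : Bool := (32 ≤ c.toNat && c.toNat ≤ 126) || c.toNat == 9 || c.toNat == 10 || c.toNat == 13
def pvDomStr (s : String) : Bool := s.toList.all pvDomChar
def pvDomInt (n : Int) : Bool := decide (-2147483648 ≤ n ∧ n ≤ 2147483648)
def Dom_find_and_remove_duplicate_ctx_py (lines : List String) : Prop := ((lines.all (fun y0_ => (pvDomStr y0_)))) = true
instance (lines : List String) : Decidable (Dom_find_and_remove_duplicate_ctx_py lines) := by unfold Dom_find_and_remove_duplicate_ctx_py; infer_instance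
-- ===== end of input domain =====

-- B replaces A's collect-indices-then-pop-backwards (two phases, in-place pops) by a single
-- forward copying pass that skips the duplicate ctx lines (objective: simpler).
-- Both Pythons mutate `lines` in place and return it; the equivalence proved here is about the
-- returned list value, which in both versions is also the final content of `lines`.

-- ===== PORT A =====
-- shared condition helpers (the identical substring tests appearing verbatim in both Pythons)
def pvIsMarker (l : String) : Bool := PySem.Str.isIn "void FileAccessEncrypted::_close()" l
def pvIsBrace (l : String) : Bool := PySem.Str.startswith l "}"
-- `in_close_function and 'CryptoCore::AESContext ctx' in line and 'ctx.set_encode_key' not in lines[i+1] if i+1 < len(lines) else False`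
def pvDup (inc : Bool) (l : String) (rest : List String) : Bool :=
  match rest with
  | [] => false
  | nxt :: _ => inc && PySem.Str.isIn "CryptoCore::AESContext ctx" l &&
      !(PySem.Str.isIn "ctx.set_encode_key" nxt)

-- A, first loop: collect `lines_to_remove` (state: index i, in_close_function, ctx_count_in_close)
def pvCtxScan : List String → Nat → Bool → Int → List Nat
  | [], _, _, _ => []
  | l :: rest, i, inc, cnt =>
    if pvIsMarker l then pvCtxScan rest (i+1) true cnt
    else if inc && pvIsBrace l then []
    else if pvDup inc l rest then
      (if cnt + 1 > 1 then i :: pvCtxScan rest (i+1) inc (cnt+1)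
       else pvCtxScan rest (i+1) inc (cnt+1))
    else pvCtxScan rest (i+1) inc cnt

-- A, second loop: `for i in reversed(lines_to_remove): lines.pop(i); if …: lines.pop(i)`
def pvCtxRemove : List Nat → List String → List String
  | [], ls => ls
  | i :: rest, ls =>
    match PySem.List.pop? ls (i : Int) with
    | none => pvCtxRemove rest ls      -- unreachable for A's indices (Python would raise IndexError)
    | some (_, ls1) =>
      let ls2 :=
        if i < ls1.length &&
           PySem.Str.isIn "ctx.set_encode_key" (ls1.getD i "") &&
           PySem.Str.isIn "key.ptrw()" (ls1.getD i "") then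
          (match PySem.List.pop? ls1 (i : Int) with
           | none => ls1
           | some (_, ls1') => ls1')
        else ls1
      pvCtxRemove rest ls2

def find_and_remove_duplicate_ctx_py (lines : List String) : List String :=
  pvCtxRemove (pvCtxScan lines 0 false 0).reverse lines

-- ===== PORT B =====
-- single forward pass (state: in_close, count); `result.extend(lines[i:]); break` on the brace
def pvCtxGo : List String → Bool → Int → List String
  | [], _, _ => []
  | l :: rest, inc, cnt =>
    if pvIsMarker l then l :: pvCtxGo rest true cnt
    else if inc && pvIsBrace l then l :: rest
    else if pvDup inc l rest then
      (if cnt + 1 > 1 then pvCtxGo rest inc (cnt+1)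
       else l :: pvCtxGo rest inc (cnt+1))
    else l :: pvCtxGo rest inc cnt

def find_and_remove_duplicate_ctx_py_alt (lines : List String) : List String :=
  pvCtxGo lines false 0

-- ===== PRECONDITION & SPEC =====
def Spec_find_and_remove_duplicate_ctx_py (lines : List String) (out : List String) : Prop := out = find_and_remove_duplicate_ctx_py_alt lines
instance (lines : List String) (out : List String) : Decidable (Spec_find_and_remove_duplicate_ctx_py lines out) := by unfold Spec_find_and_remove_duplicate_ctx_py; infer_instance

-- ===== CLAIM (what is proved, stated in full; the proofs are below) =====
def Claim_equal_find_and_remove_duplicate_ctx_py : Prop := ∀ (lines : List String), Dom_find_and_remove_duplicate_ctx_py lines → Spec_find_and_remove_duplicate_ctx_py lines (find_and_remove_duplicate_ctx_py lines)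

-- ===== LEMMAS AND PROOFS =====

-- remove the elements whose absolute index (counter starts at i) lies in S
def pvRm (S : List Nat) : List String → Nat → List String
  | [], _ => []
  | x :: d, i => if i ∈ S then pvRm S d (i+1) else x :: pvRm S d (i+1)

theorem pvDropSucc (full : List String) (i : Nat) : full.drop (i+1) = (full.drop i).drop 1 := by
  rw [List.drop_drop]

theorem pvRm_nil : ∀ (d : List String) (i : Nat), pvRm [] d i = d := by
  intro d; induction d with
  | nil => intro i; rfl
  | cons x t ih => intro i; simp [pvRm, ih]

theorem pvRm_cons_lt (s : Nat) (S : List Nat) :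
    ∀ (d : List String) (i : Nat), s < i → pvRm (s :: S) d i = pvRm S d i := by
  intro d; induction d with
  | nil => intro i _; rfl
  | cons x t ih =>
    intro i hi
    have hne : i ≠ s := by omega
    simp only [pvRm, List.mem_cons, hne, false_or]
    rw [ih (i+1) (by omega)]

theorem pvCtxScan_lb : ∀ (r : List String) (i : Nat) (inc : Bool) (cnt : Int) (j : Nat),
    j ∈ pvCtxScan r i inc cnt → i ≤ j := by
  intro r; induction r with
  | nil => intro i inc cnt j h; simp [pvCtxScan] at h
  | cons l rest ih =>
    intro i inc cnt j h
    simp only [pvCtxScan] at h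
    split_ifs at h with h1 h2 h3 h4
    · exact le_of_lt (lt_of_lt_of_le (Nat.lt_succ_self i) (ih _ _ _ j h))
    · simp at h
    · rcases List.mem_cons.1 h with rfl | h'
      · exact le_refl _
      · exact le_of_lt (lt_of_lt_of_le (Nat.lt_succ_self i) (ih _ _ _ j h'))
    · exact le_of_lt (lt_of_lt_of_le (Nat.lt_succ_self i) (ih _ _ _ j h))
    · exact le_of_lt (lt_of_lt_of_le (Nat.lt_succ_self i) (ih _ _ _ j h))

theorem pvCtxScan_pairwise : ∀ (r : List String) (i : Nat) (inc : Bool) (cnt : Int),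
    (pvCtxScan r i inc cnt).Pairwise (· < ·) := by
  intro r; induction r with
  | nil => intro i inc cnt; simp [pvCtxScan]
  | cons l rest ih =>
    intro i inc cnt
    simp only [pvCtxScan]
    split_ifs with h1 h2 h3 h4
    · exact ih _ _ _
    · simp
    · exact List.pairwise_cons.2 ⟨fun j hj => lt_of_lt_of_le (Nat.lt_succ_self i) (pvCtxScan_lb _ _ _ _ j hj), ih _ _ _⟩
    · exact ih _ _ _
    · exact ih _ _ _

-- every emitted index j has a next line in the full list, and that next line lacks 'ctx.set_encode_key'
theorem pvCtxScan_prop : ∀ (r : List String) (i : Nat) (inc : Bool) (cnt : Int)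
    (full : List String), full.drop i = r →
    ∀ j ∈ pvCtxScan r i inc cnt,
      j + 1 < full.length ∧ PySem.Str.isIn "ctx.set_encode_key" (full.getD (j+1) "") = false := by
  intro r; induction r with
  | nil => intro i inc cnt full hf j hj; simp [pvCtxScan] at hj
  | cons l rest ih =>
    intro i inc cnt full hf j hj
    have hdrop : full.drop (i+1) = rest := by
      rw [pvDropSucc, hf]; rfl
    simp only [pvCtxScan] at hj
    split_ifs at hj with h1 h2 h3 h4
    · exact ih _ _ _ full hdrop j hj
    · simp at hj
    · rcases List.mem_cons.1 hj with rfl | hj'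
      · -- j = i : pvDup holds, so rest = nxt :: _ with the property
        cases rest with
        | nil => simp [pvDup] at h3
        | cons nxt t =>
          have hget : full[j+1]? = some nxt := by
            have : (full.drop (j+1))[0]? = some nxt := by rw [hdrop]; rfl
            simpa [List.getElem?_drop] using this
          constructor
          · exact (List.getElem?_eq_some_iff.1 hget).1
          · have hgd : full.getD (j+1) "" = nxt := by
              simp [List.getD_eq_getElem?_getD, hget]
            simp only [pvDup, Bool.and_eq_true, Bool.not_eq_true'] at h3
            rw [List.getD_eq_getElem?_getD, hget]
            simpa using h3.2
      · exact ih _ _ _ full hdrop j hj'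
    · exact ih _ _ _ full hdrop j hj
    · exact ih _ _ _ full hdrop j hj

-- B's pass = index-filter by A's collected indices
theorem pvCtxGo_eq_pvRm : ∀ (r : List String) (i : Nat) (inc : Bool) (cnt : Int),
    pvCtxGo r inc cnt = pvRm (pvCtxScan r i inc cnt) r i := by
  intro r; induction r with
  | nil => intro i inc cnt; rfl
  | cons l rest ih =>
    intro i inc cnt
    simp only [pvCtxGo, pvCtxScan]
    split_ifs with h1 h2 h3 h4
    · have hnm : i ∉ pvCtxScan rest (i+1) true cnt :=
        fun h => absurd (pvCtxScan_lb _ _ _ _ _ h) (by omega)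
      simp only [pvRm, if_neg hnm]
      exact congrArg _ (ih (i+1) true cnt)
    · simp [pvRm_nil]
    · have : i ∈ i :: pvCtxScan rest (i+1) inc (cnt+1) := List.mem_cons_self
      simp only [pvRm, if_pos this]
      rw [pvRm_cons_lt _ _ _ _ (Nat.lt_succ_self i)]
      exact ih _ _ _
    · have hnm : i ∉ pvCtxScan rest (i+1) inc (cnt+1) :=
        fun h => absurd (pvCtxScan_lb _ _ _ _ _ h) (by omega)
      simp only [pvRm, if_neg hnm]
      exact congrArg _ (ih (i+1) inc (cnt+1))
    · have hnm : i ∉ pvCtxScan rest (i+1) inc cnt :=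
        fun h => absurd (pvCtxScan_lb _ _ _ _ _ h) (by omega)
      simp only [pvRm, if_neg hnm]
      exact congrArg _ (ih (i+1) inc cnt)

theorem pvCtxRemove_append (a b : List Nat) : ∀ ls,
    pvCtxRemove (a ++ b) ls = pvCtxRemove b (pvCtxRemove a ls) := by
  induction a with
  | nil => intro ls; rfl
  | cons x t ih =>
    intro ls
    simp only [List.cons_append, pvCtxRemove]
    cases PySem.List.pop? ls (x : Int) with
    | none => exact ih ls
    | some p => exact ih _

-- splitting pvRm at a prefix none of whose indices are removed
theorem pvRm_split (S : List Nat) : ∀ (m : Nat) (d : List String) (i : Nat),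
    (∀ j ∈ S, i + m ≤ j) →
    pvRm S d i = d.take m ++ pvRm S (d.drop m) (i + m) := by
  intro m; induction m with
  | zero => intro d i _; simp
  | succ m ihm =>
    intro d i hb
    cases d with
    | nil => simp [pvRm]
    | cons x t =>
      have hnm : i ∉ S := fun h => absurd (hb i h) (by omega)
      have harith : i + (m+1) = (i+1) + m := by omega
      simp only [pvRm, if_neg hnm, List.take_succ_cons, List.drop_succ_cons, List.cons_append, harith]
      rw [ihm t (i+1) (fun j hj => by have := hb j hj; omega)]

-- head of the filtered suffix always lacks 'ctx.set_encode_key'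
theorem pvRm_head_no_key (ls : List String) (S : List Nat)
    (hS : ∀ j ∈ S, j + 1 < ls.length ∧ PySem.Str.isIn "ctx.set_encode_key" (ls.getD (j+1) "") = false) :
    ∀ (d : List String) (m : Nat), d = ls.drop m →
    PySem.Str.isIn "ctx.set_encode_key" (ls.getD m "") = false →
    ∀ x, (pvRm S d m).head? = some x → PySem.Str.isIn "ctx.set_encode_key" x = false := by
  intro d; induction d with
  | nil => intro m _ _ x hx; simp [pvRm] at hx
  | cons c rest ih =>
    intro m hd hm x hx
    have hget : ls[m]? = some c := by
      have : (ls.drop m)[0]? = some c := by rw [← hd]; rfl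
      simpa [List.getElem?_drop] using this
    have hcm : ls.getD m "" = c := by simp [List.getD_eq_getElem?_getD, hget]
    have hrest : rest = ls.drop (m+1) := by
      rw [pvDropSucc, ← hd]; rfl
    simp only [pvRm] at hx
    by_cases hmem : m ∈ S
    · rw [if_pos hmem] at hx
      exact ih (m+1) hrest ((hS m hmem).2) x hx
    · rw [if_neg hmem] at hx
      simp only [List.head?_cons, Option.some.injEq] at hx
      rw [← hx, ← hcm]; exact hm

-- helper: erase exactly at the seam of an append
theorem pvEraseIdx_append (A : List String) : ∀ (x : String) (B : List String),
    (A ++ x :: B).eraseIdx A.length = A ++ B := by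
  induction A with
  | nil => intro x B; rfl
  | cons a t ih => intro x B; simp [ih]

-- A's second loop, applied to strictly increasing indices each of whose successor line
-- exists and lacks 'ctx.set_encode_key', is the pure index-filter (the companion pop is dead)
theorem pvCtxRemove_eq_pvRm : ∀ (S : List Nat) (ls : List String),
    S.Pairwise (· < ·) →
    (∀ j ∈ S, j + 1 < ls.length ∧ PySem.Str.isIn "ctx.set_encode_key" (ls.getD (j+1) "") = false) →
    pvCtxRemove S.reverse ls = pvRm S ls 0 := by
  intro S; induction S with
  | nil => intro ls _ _; simp [pvCtxRemove, pvRm_nil]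
  | cons s S' ih =>
    intro ls hpw hS
    have hpw' : S'.Pairwise (· < ·) := (List.pairwise_cons.1 hpw).2
    have hlt : ∀ j ∈ S', s < j := (List.pairwise_cons.1 hpw).1
    have hS' : ∀ j ∈ S', j + 1 < ls.length ∧ PySem.Str.isIn "ctx.set_encode_key" (ls.getD (j+1) "") = false :=
      fun j hj => hS j (List.mem_cons_of_mem _ hj)
    have hs1 : s + 1 < ls.length := (hS s List.mem_cons_self).1
    have hkey : PySem.Str.isIn "ctx.set_encode_key" (ls.getD (s+1) "") = false :=
      (hS s List.mem_cons_self).2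
    rw [List.reverse_cons, pvCtxRemove_append, ih ls hpw' hS']
    have hslen : s < ls.length := by omega
    cases hd : ls.drop s with
    | nil =>
      exfalso
      have := List.length_drop (l := ls) (i := s)
      rw [hd] at this
      simp at this
      omega
    | cons c t =>
      have htake1 : ls.take (s+1) = ls.take s ++ [c] := by
        rw [List.take_add, hd]; rfl
      have hdrop1 : ls.drop (s+1) = t := by
        rw [pvDropSucc, hd]; rfl
      set R := pvRm S' t (s+1) with hRdef
      have hsplit : pvRm S' ls 0 = ls.take s ++ c :: R := by
        have h0 := pvRm_split S' (s+1) ls 0 (fun j hj => by have := hlt j hj; omega)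
        simp only [Nat.zero_add] at h0
        rw [h0, htake1, hdrop1, List.append_assoc]
        rfl
      have hlen_takes : (ls.take s).length = s := by rw [List.length_take]; omega
      have hslt : s < (ls.take s ++ c :: R).length := by
        simp [hlen_takes]
      have hpop : PySem.List.pop? (ls.take s ++ c :: R) (s : Int) =
          some ((ls.take s ++ c :: R)[s], (ls.take s ++ c :: R).eraseIdx s) :=
        PySem.List.pop?_natCast _ _ hslt
      have herase : (ls.take s ++ c :: R).eraseIdx s = ls.take s ++ R := by
        have h := pvEraseIdx_append (ls.take s) c R
        rwa [hlen_takes] at h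
      have hguard : ((decide (s < (ls.take s ++ R).length)) &&
          PySem.Str.isIn "ctx.set_encode_key" ((ls.take s ++ R).getD s "") &&
          PySem.Str.isIn "key.ptrw()" ((ls.take s ++ R).getD s "")) = false := by
        cases hRc : R with
        | nil =>
          simp [hlen_takes]
        | cons x t' =>
          have hg : (ls.take s ++ (x :: t'))[s]? = some x := by
            rw [List.getElem?_append_right (by omega)]
            simp [hlen_takes]
          have hnk : PySem.Str.isIn "ctx.set_encode_key" x = false := by
            apply pvRm_head_no_key ls S' hS' t (s+1) hdrop1.symm hkey
            rw [← hRdef, hRc]; rfl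
          simp [hg]
          intro _ h
          simp [h] at hnk
      have hstep : pvCtxRemove [s] (pvRm S' ls 0) = ls.take s ++ R := by
        rw [hsplit]
        simp only [pvCtxRemove, hpop, herase]
        simp only [hguard, Bool.false_eq_true, if_false]
      rw [hstep]
      -- identify with pvRm (s :: S') ls 0
      have hsplit2 : pvRm (s :: S') ls 0 = ls.take s ++ pvRm (s :: S') (ls.drop s) s := by
        have h0 := pvRm_split (s :: S') s ls 0 (by
          intro j hj
          rcases List.mem_cons.1 hj with rfl | hj'
          · omega
          · have := hlt j hj'; omega)
        simpa using h0
      rw [hsplit2, hd]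
      simp only [pvRm, if_pos (List.mem_cons_self : s ∈ s :: S')]
      rw [pvRm_cons_lt _ _ _ _ (Nat.lt_succ_self s)]

-- ===== VERDICT (by name: the statement is the Claim_ definition above) =====
theorem find_and_remove_duplicate_ctx_py_spec : Claim_equal_find_and_remove_duplicate_ctx_py := by
  intro lines _
  unfold Spec_find_and_remove_duplicate_ctx_py find_and_remove_duplicate_ctx_py find_and_remove_duplicate_ctx_py_alt
  rw [pvCtxRemove_eq_pvRm _ _ (pvCtxScan_pairwise lines 0 false 0)
      (pvCtxScan_prop lines 0 false 0 lines (by simp))]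
  exact (pvCtxGo_eq_pvRm lines 0 false 0).symm
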